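-- pv_equiv track=rewrite | github.com/desibewdabbsr/LocalMachine132 | Reference_old_repository.bk/deployment/backend/core/ai_integration/ml_engine/requirement_analyzer.py | _extract_optional_features
-- ===== SOURCE A (Python) =====
-- from typing import Dict, List, Any, Optional
--
-- def _extract_optional_features(command: str) -> List[str]:
--         """Extract optional features from command"""
--         words = command.lower().split()
--         optional_features = []
--         optional_patterns = {
--             "Governance": ["dao", "voting", "proposal"],
--             "Analytics": ["dashboard", "metrics", "tracking"],
--             "Integration": ["bridge", "cross-chain", "interop"]
--         }
--         for feature, patterns in optional_patterns.items():
--             if any(pattern in words for pattern in patterns):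
--                 optional_features.append(feature)
--         return optional_features
-- ===== SOURCE B (Python) =====
-- from typing import Dict, List, Any, Optional
--
-- def _extract_optional_features(command: str) -> List[str]:
--     """Extract optional features from command (reverse-index re-implementation)"""
--     optional_patterns = {
--         "Governance": ["dao", "voting", "proposal"],
--         "Analytics": ["dashboard", "metrics", "tracking"],
--         "Integration": ["bridge", "cross-chain", "interop"]
--     }
--     index = {kw: feat for feat, kws in optional_patterns.items() for kw in kws}
--     found = set()
--     for w in command.lower().split():
--         feat = index.get(w)
--         if feat is not None:
--             found.add(feat)
--     return [feat for feat in optional_patterns if feat in found]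
-- ===== Notes on version B (the rewrite author's own statement) =====
-- stated objective: alternative
-- what changed: Replaces the per-category scan over the word list (any(pattern in words ...), re-scanning the words for each of the 9 keywords) with a reverse index from keyword to feature built once, a single pass over the words collecting matched features into a set, and a final pass over the category order to emit matches.
import Mathlib
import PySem

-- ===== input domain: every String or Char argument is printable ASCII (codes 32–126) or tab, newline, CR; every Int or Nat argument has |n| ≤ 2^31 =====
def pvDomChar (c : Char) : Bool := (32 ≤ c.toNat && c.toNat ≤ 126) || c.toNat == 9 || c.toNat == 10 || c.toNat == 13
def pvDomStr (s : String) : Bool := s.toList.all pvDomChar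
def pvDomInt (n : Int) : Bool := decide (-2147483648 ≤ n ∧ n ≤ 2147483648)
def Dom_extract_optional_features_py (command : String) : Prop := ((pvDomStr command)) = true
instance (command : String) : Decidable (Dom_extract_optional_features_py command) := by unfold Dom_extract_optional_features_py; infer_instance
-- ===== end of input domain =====

set_option maxRecDepth 4096

-- ===== PORT A =====
-- B builds a reverse keyword→feature index once and scans the words in one pass; same result (alternative decomposition).
-- the dict literal optional_patterns, as its items() list (insertion order)
def pvPatternsA : List (String × List String) :=
  [("Governance", ["dao", "voting", "proposal"]),
   ("Analytics", ["dashboard", "metrics", "tracking"]),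
   ("Integration", ["bridge", "cross-chain", "interop"])]

def extract_optional_features_py (command : String) : List String :=
  let words := PySem.Str.split₀ (PySem.Str.lower command)
  pvPatternsA.foldl (fun acc fp =>
    if fp.2.any (fun pattern => words.contains pattern) then acc ++ [fp.1] else acc) []

-- ===== PORT B =====
def pvPatternsB : List (String × List String) :=
  [("Governance", ["dao", "voting", "proposal"]),
   ("Analytics", ["dashboard", "metrics", "tracking"]),
   ("Integration", ["bridge", "cross-chain", "interop"])]

-- index = {kw: feat for feat, kws in optional_patterns.items() for kw in kws}
def pvIndexB : PySem.Dict String String :=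
  pvPatternsB.foldl (fun d fp => fp.2.foldl (fun d kw => d.insert kw fp.1) d) PySem.Dict.empty

def pvStepB (s : PySem.Set String) (w : String) : PySem.Set String :=
  match pvIndexB.get? w with
  | some feat => PySem.Set.add s feat
  | none => s

def extract_optional_features_py_alt (command : String) : List String :=
  let found : PySem.Set String :=
    (PySem.Str.split₀ (PySem.Str.lower command)).foldl pvStepB PySem.Set.empty
  (pvPatternsB.map Prod.fst).filter (fun feat => PySem.Set.contains found feat)

-- ===== PRECONDITION & SPEC =====
def Spec_extract_optional_features_py (command : String) (out : List String) : Prop := out = extract_optional_features_py_alt command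
instance (command : String) (out : List String) : Decidable (Spec_extract_optional_features_py command out) := by unfold Spec_extract_optional_features_py; infer_instance

-- ===== CLAIM (what is proved, stated in full; the proofs are below) =====
def Claim_equal_extract_optional_features_py : Prop := ∀ (command : String), Dom_extract_optional_features_py command → Spec_extract_optional_features_py command (extract_optional_features_py command)

-- ===== LEMMAS AND PROOFS =====

-- the reverse index as a literal association list
lemma pvIndexB_eq : pvIndexB = PySem.Dict.mk [("dao","Governance"),("voting","Governance"),("proposal","Governance"),("dashboard","Analytics"),("metrics","Analytics"),("tracking","Analytics"),("bridge","Integration"),("cross-chain","Integration"),("interop","Integration")] := rfl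

-- looking an arbitrary word up in the reverse index hits exactly that feature's keyword list
lemma pvIndexB_get_gov (w : String) :
    (pvIndexB.get? w = some "Governance") ↔ (w = "dao" ∨ w = "voting" ∨ w = "proposal") := by
  rw [pvIndexB_eq]
  simp only [PySem.Dict.get?_mk_cons, beq_iff_eq]
  split_ifs <;> simp_all [eq_comm, PySem.Dict.get?]

lemma pvIndexB_get_ana (w : String) :
    (pvIndexB.get? w = some "Analytics") ↔ (w = "dashboard" ∨ w = "metrics" ∨ w = "tracking") := by
  rw [pvIndexB_eq]
  simp only [PySem.Dict.get?_mk_cons, beq_iff_eq]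
  split_ifs <;> simp_all [eq_comm, PySem.Dict.get?]

lemma pvIndexB_get_int (w : String) :
    (pvIndexB.get? w = some "Integration") ↔ (w = "bridge" ∨ w = "cross-chain" ∨ w = "interop") := by
  rw [pvIndexB_eq]
  simp only [PySem.Dict.get?_mk_cons, beq_iff_eq]
  split_ifs <;> simp_all [eq_comm, PySem.Dict.get?]

-- membership in the accumulated found-set
lemma pv_found_mem (words : List String) (s : PySem.Set String) (f : String) :
    f ∈ words.foldl pvStepB s ↔ f ∈ s ∨ ∃ w ∈ words, pvIndexB.get? w = some f := by
  induction words generalizing s with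
  | nil => simp
  | cons w ws ih =>
    simp only [List.foldl_cons, ih, List.mem_cons, pvStepB]
    cases h : pvIndexB.get? w with
    | none =>
      constructor
      · rintro (hs | ⟨u, hu, hg⟩)
        · exact Or.inl hs
        · exact Or.inr ⟨u, Or.inr hu, hg⟩
      · rintro (hs | ⟨u, (rfl | hu), hg⟩)
        · exact Or.inl hs
        · rw [h] at hg; cases hg
        · exact Or.inr ⟨u, hu, hg⟩
    | some g =>
      rw [PySem.Set.mem_add]
      constructor
      · rintro ((hs | rfl) | ⟨u, hu, hg⟩)
        · exact Or.inl hs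
        · exact Or.inr ⟨w, Or.inl rfl, h⟩
        · exact Or.inr ⟨u, Or.inr hu, hg⟩
      · rintro (hs | ⟨u, (rfl | hu), hg⟩)
        · exact Or.inl (Or.inl hs)
        · rw [h] at hg; exact Or.inl (Or.inr (Option.some_injective _ hg).symm)
        · exact Or.inr ⟨u, hu, hg⟩

-- found-set membership test for one feature = A's scan over that feature's keyword list
lemma pv_contains_of_get (words : List String) (f : String) (k1 k2 k3 : String)
    (hget : ∀ w, (pvIndexB.get? w = some f) ↔ (w = k1 ∨ w = k2 ∨ w = k3)) :
    PySem.Set.contains (words.foldl pvStepB PySem.Set.empty) f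
      = ([k1, k2, k3].any fun pattern => words.contains pattern) := by
  rw [Bool.eq_iff_iff]
  simp only [PySem.Set.contains_iff, pv_found_mem, List.any_eq_true,
    List.mem_cons, List.not_mem_nil, List.contains_iff_mem, hget, PySem.Set.empty]
  aesop

-- ===== VERDICT (by name: the statement is the Claim_ definition above) =====
theorem extract_optional_features_py_spec : Claim_equal_extract_optional_features_py := by
  intro command _
  unfold Spec_extract_optional_features_py extract_optional_features_py extract_optional_features_py_alt
  set words := PySem.Str.split₀ (PySem.Str.lower command) with hw
  have hg := pv_contains_of_get words "Governance" "dao" "voting" "proposal" pvIndexB_get_gov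
  have ha := pv_contains_of_get words "Analytics" "dashboard" "metrics" "tracking" pvIndexB_get_ana
  have hi := pv_contains_of_get words "Integration" "bridge" "cross-chain" "interop" pvIndexB_get_int
  simp only [pvPatternsA, pvPatternsB, List.foldl, List.map, List.filter, hg, ha, hi]
  cases (["dao", "voting", "proposal"].any fun pattern => words.contains pattern) <;>
  cases (["dashboard", "metrics", "tracking"].any fun pattern => words.contains pattern) <;>
  cases (["bridge", "cross-chain", "interop"].any fun pattern => words.contains pattern) <;>
  simp
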